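-- pv_equiv track=rewrite | github.com/MichaelEggleston/Snake_AI | snake_game_q_agent.py | check_bounded
-- ===== SOURCE A (Python) =====
-- def check_bounded(snake_body, coordinate, direction):
--     #bounded Up, Down, Left, Right
--     bounded = [False, False, False, False]
--     if coordinate not in snake_body:
--         if direction == "down":
--             bounded[0] = True
--         else:
--             for temp_coordinate in snake_body:
--                 if temp_coordinate[0] == coordinate[0] and temp_coordinate[1] < coordinate[1]:
--                     bounded[0] = True
--                     break
--         if direction == "up":
--             bounded[1] = True
--         else:
--             for temp_coordinate in snake_body:
--                 if temp_coordinate[0] == coordinate[0] and temp_coordinate[1] > coordinate[1]: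
--                     bounded[1] = True
--                     break
--         if direction == "right":
--             bounded[2] = True
--         else:
--             for temp_coordinate in snake_body:
--                 if temp_coordinate[0] < coordinate[0] and temp_coordinate[1] == coordinate[1]:
--                     bounded[2] = True
--                     break
--         if direction == "left":
--             bounded[3] = True
--         else:
--             for temp_coordinate in snake_body:
--                 if temp_coordinate[0] > coordinate[0] and temp_coordinate[1] == coordinate[1]:
--                     bounded[3] = True
--                     break
--     if bounded == [True, True, True, True]:
--         return True
--     return False
-- ===== SOURCE B (Python) =====
-- def check_bounded(snake_body, coordinate, direction):
--     if coordinate in snake_body: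
--         return False
--     up = direction == "down"
--     down = direction == "up"
--     left = direction == "right"
--     right = direction == "left"
--     x, y = coordinate
--     for sx, sy in snake_body:
--         if sx == x and sy < y:
--             up = True
--         elif sx == x and sy > y:
--             down = True
--         elif sx < x and sy == y:
--             left = True
--         elif sx > x and sy == y:
--             right = True
--     return up and down and left and right
-- ===== Notes on version B (the rewrite author's own statement) =====
-- stated objective: simpler
-- what changed: Replaces four separate break-early scans of snake_body (one per side) by direction-seeded flags and a single pass that OR-updates all four flags, with an early False return on membership.
import Mathlib
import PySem

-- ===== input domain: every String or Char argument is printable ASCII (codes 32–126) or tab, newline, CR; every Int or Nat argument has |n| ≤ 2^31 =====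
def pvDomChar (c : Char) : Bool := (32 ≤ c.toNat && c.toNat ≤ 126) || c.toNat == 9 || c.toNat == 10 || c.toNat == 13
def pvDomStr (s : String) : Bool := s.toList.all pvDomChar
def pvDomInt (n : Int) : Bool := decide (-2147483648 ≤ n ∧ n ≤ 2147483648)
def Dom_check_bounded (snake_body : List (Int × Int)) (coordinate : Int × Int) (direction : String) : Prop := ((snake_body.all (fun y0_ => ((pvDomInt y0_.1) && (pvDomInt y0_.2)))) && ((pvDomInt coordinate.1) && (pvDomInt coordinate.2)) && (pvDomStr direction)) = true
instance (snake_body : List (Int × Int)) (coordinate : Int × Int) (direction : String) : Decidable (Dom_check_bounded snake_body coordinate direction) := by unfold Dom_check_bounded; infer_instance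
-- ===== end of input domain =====

-- B replaces A's four separate break-early scans by direction-seeded flags updated in one pass (simpler decomposition; same cost).

-- ===== PORT A =====
-- A's 'for … if cond: flag = True; break' loop: returns true iff some element satisfies p, scanning left to right with break.
def pvLoopAny (p : Int × Int → Bool) : List (Int × Int) → Bool
  | [] => false
  | c :: rest => if p c then true else pvLoopAny p rest

def check_bounded (snake_body : List (Int × Int)) (coordinate : Int × Int) (direction : String) : Bool :=
  let bounded : List Bool := [false, false, false, false]
  let bounded :=
    if ¬ snake_body.contains coordinate then
      let b0 := if direction == "down" then true
                else pvLoopAny (fun c => c.1 == coordinate.1 && decide (c.2 < coordinate.2)) snake_body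
      let b1 := if direction == "up" then true
                else pvLoopAny (fun c => c.1 == coordinate.1 && decide (c.2 > coordinate.2)) snake_body
      let b2 := if direction == "right" then true
                else pvLoopAny (fun c => decide (c.1 < coordinate.1) && c.2 == coordinate.2) snake_body
      let b3 := if direction == "left" then true
                else pvLoopAny (fun c => decide (c.1 > coordinate.1) && c.2 == coordinate.2) snake_body
      [b0, b1, b2, b3]
    else bounded
  if bounded == [true, true, true, true] then true else false

-- ===== PORT B =====
-- B's single-pass loop body (the if/elif chain updating the four flags).
def pvStep (coordinate : Int × Int) (f : Bool × Bool × Bool × Bool) (c : Int × Int) : Bool × Bool × Bool × Bool :=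
  if c.1 == coordinate.1 && decide (c.2 < coordinate.2) then (true, f.2.1, f.2.2.1, f.2.2.2)
  else if c.1 == coordinate.1 && decide (c.2 > coordinate.2) then (f.1, true, f.2.2.1, f.2.2.2)
  else if decide (c.1 < coordinate.1) && c.2 == coordinate.2 then (f.1, f.2.1, true, f.2.2.2)
  else if decide (c.1 > coordinate.1) && c.2 == coordinate.2 then (f.1, f.2.1, f.2.2.1, true)
  else f

def check_bounded_alt (snake_body : List (Int × Int)) (coordinate : Int × Int) (direction : String) : Bool :=
  if snake_body.contains coordinate then false
  else
    let init : Bool × Bool × Bool × Bool :=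
      (direction == "down", direction == "up", direction == "right", direction == "left")
    let f := snake_body.foldl (pvStep coordinate) init
    f.1 && f.2.1 && f.2.2.1 && f.2.2.2

-- ===== PRECONDITION & SPEC =====
def Spec_check_bounded (snake_body : List (Int × Int)) (coordinate : Int × Int) (direction : String) (out : Bool) : Prop := out = check_bounded_alt snake_body coordinate direction
instance (snake_body : List (Int × Int)) (coordinate : Int × Int) (direction : String) (out : Bool) : Decidable (Spec_check_bounded snake_body coordinate direction out) := by unfold Spec_check_bounded; infer_instance

-- ===== CLAIM (what is proved, stated in full; the proofs are below) =====
def Claim_equal_check_bounded : Prop := ∀ (snake_body : List (Int × Int)) (coordinate : Int × Int) (direction : String), Dom_check_bounded snake_body coordinate direction → Spec_check_bounded snake_body coordinate direction (check_bounded snake_body coordinate direction)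

-- ===== LEMMAS AND PROOFS =====
theorem pvFold_flags (coordinate : Int × Int) (body : List (Int × Int)) (u d l r : Bool) :
    body.foldl (pvStep coordinate) (u, d, l, r) =
      (u || pvLoopAny (fun c => c.1 == coordinate.1 && decide (c.2 < coordinate.2)) body,
       d || pvLoopAny (fun c => c.1 == coordinate.1 && decide (c.2 > coordinate.2)) body,
       l || pvLoopAny (fun c => decide (c.1 < coordinate.1) && c.2 == coordinate.2) body,
       r || pvLoopAny (fun c => decide (c.1 > coordinate.1) && c.2 == coordinate.2) body) := by
  induction body generalizing u d l r with
  | nil => simp [pvLoopAny]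
  | cons c rest ih =>
    simp only [List.foldl_cons, pvStep, pvLoopAny]
    by_cases h1 : (c.1 == coordinate.1 && decide (c.2 < coordinate.2)) = true
    · have h2 : (c.1 == coordinate.1 && decide (c.2 > coordinate.2)) = false := by
        simp_all <;> omega
      have h3 : (decide (c.1 < coordinate.1) && c.2 == coordinate.2) = false := by
        simp_all <;> omega
      have h4 : (decide (c.1 > coordinate.1) && c.2 == coordinate.2) = false := by
        simp_all <;> omega
      simp [h1, h2, h3, h4, ih]
    · by_cases h2 : (c.1 == coordinate.1 && decide (c.2 > coordinate.2)) = true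
      · have h3 : (decide (c.1 < coordinate.1) && c.2 == coordinate.2) = false := by
          simp_all <;> omega
        have h4 : (decide (c.1 > coordinate.1) && c.2 == coordinate.2) = false := by
          simp_all <;> omega
        simp [h1, h2, h3, h4, ih]
      · by_cases h3 : (decide (c.1 < coordinate.1) && c.2 == coordinate.2) = true
        · have h4 : (decide (c.1 > coordinate.1) && c.2 == coordinate.2) = false := by
            simp_all <;> omega
          simp [h1, h2, h3, h4, ih]
        · by_cases h4 : (decide (c.1 > coordinate.1) && c.2 == coordinate.2) = true
          · simp [h1, h2, h3, h4, ih]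
          · simp [h1, h2, h3, h4, ih]

-- ===== VERDICT (by name: the statement is the Claim_ definition above) =====
theorem check_bounded_spec : Claim_equal_check_bounded := by
  intro snake_body coordinate direction _
  unfold Spec_check_bounded check_bounded check_bounded_alt
  by_cases hm : coordinate ∈ snake_body
  · simp [hm, List.contains_eq_mem]
  · by_cases h1 : direction = "down" <;> by_cases h2 : direction = "up" <;>
      by_cases h3 : direction = "right" <;> by_cases h4 : direction = "left" <;>
      simp [hm, List.contains_eq_mem, pvFold_flags, h1, h2, h3, h4, beq_iff_eq, Bool.and_assoc] <;>
      simp [beq_eq_false_iff_ne.mpr h1, beq_eq_false_iff_ne.mpr h2,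
            beq_eq_false_iff_ne.mpr h3, beq_eq_false_iff_ne.mpr h4, Bool.and_assoc]
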